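-- pv_equiv track=rewrite | github.com/ecmwf-projects/cads-adaptors | cads_adaptors/constraints.py | apply_constraints_in_old_cds_fashion3
-- ===== SOURCE A (Python) =====
-- from typing import Any
--
-- def apply_constraints_in_old_cds_fashion3(
--     form: dict[str, set[Any]],
--     selection: dict[str, set[Any]],
--     constraints: list[dict[str, set[Any]]],
-- ) -> dict[str, list[Any]]:
--     result = {}
--
--     # if the selection is empty, return the entire form
--     if len(selection) == 0:
--         return format_to_json(form)
--
--
--     for constraint in constraints:
--         # the per-selected-widget result is the union of:
--         # - all constraints containing the selected widget with at least one
--         #   value/option in common with the selected values/options (Category 1)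
--         # - all constraints NOT containing the selected widget (Category 2)
--
--         # loop over the widgets in the selection
--         # as a general rule, a widget cannot decide for itself (but only for others)
--         # only other widgets can enable/disable options/values in the "current" widget
--         per_constraint_result = {}
--         for selected_widget_name, selected_widget_options in selection.items():
--             if selected_widget_name in constraint:
--                 constraint_selection_intersection = (
--                     selected_widget_options & constraint[selected_widget_name]
--                 )
--                 if len(constraint_selection_intersection):
--                     # factoring in Category 1 constraints
--                     if not selected_widget_name in per_constraint_result:
--                         per_constraint_result[selected_widget_name] = {}
--                         for widget_name in form:
--                             if widget_name != selected_widget_name: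
--                                 per_constraint_result[selected_widget_name][widget_name] = set()
--                     for widget_name, widget_options in constraint.items():
--                         if widget_name != selected_widget_name:
--                             if widget_name in per_constraint_result[selected_widget_name]:
--                                 per_constraint_result[selected_widget_name][widget_name] |= set(widget_options)
--                             else:
--                                 per_constraint_result[selected_widget_name][widget_name] = set(widget_options)
--             else:
--                 # factoring in Category 2 constraints
--                 if not selected_widget_name in per_constraint_result:
--                     per_constraint_result[selected_widget_name] = {}
--                     for widget_name in form:
--                         if widget_name != selected_widget_name:
--                             per_constraint_result[selected_widget_name][widget_name] = set()
--                 for widget_name, widget_options in constraint.items():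
--                     if widget_name in per_constraint_result[selected_widget_name]:
--                         per_constraint_result[selected_widget_name][widget_name] |= set(widget_options)
--                     else:
--                         per_constraint_result[selected_widget_name][widget_name] = set(widget_options)
--
--         for widget_name in form:
--             per_constraint_result_agg = set()
--             for selected_widget_name in selection:
--                 if widget_name != selected_widget_name:
--                     if selected_widget_name in per_constraint_result:
--                         if per_constraint_result_agg:
--                             per_constraint_result_agg &= per_constraint_result[selected_widget_name][widget_name]
--                         else:
--                             per_constraint_result_agg = per_constraint_result[selected_widget_name][widget_name]
--                     else:
--                         per_constraint_result_agg = set()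
--                         break
--             if widget_name in result:
--                 result[widget_name] |= per_constraint_result_agg
--             else:
--                 result[widget_name] = per_constraint_result_agg
--
--     for widget_name in form:
--         if not widget_name in result:
--             result[widget_name] = set()
--
--     # as a general rule, a widget cannot decide for itself (but only for others)
--     # only other widgets can enable/disable options/values in the "current" widget
--     # when the selection contains only one widget, we need to enable all options for that widget
--     # (as an exception from the general rule)
--     if len(selection) == 1:
--         only_widget_in_selection = next(iter(selection))
--         result[only_widget_in_selection] = form[only_widget_in_selection]
--
--     return format_to_json(result)
--
-- def format_to_json(result: dict[str, set[Any]]) -> dict[str, list[Any]]: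
--     """
--     Convert dict[str, set[Any]] into dict[str, list[Any]].
--
--     :param result: dict[str, set[Any]] containing a possible form state
--     :type: dict[str, set[Any]]:
--
--     :rtype: dict[str, list[Any]]
--     :return: the same values in dict[str, list[Any]] format
--
--     """
--     return {k: sorted(v) for (k, v) in result.items()}
-- ===== SOURCE B (Python) =====
-- from typing import Any
--
--
-- def apply_constraints_in_old_cds_fashion3(
--     form: dict[str, set[Any]],
--     selection: dict[str, set[Any]],
--     constraints: list[dict[str, set[Any]]],
-- ) -> dict[str, list[Any]]:
--     # if the selection is empty, return the entire form
--     if len(selection) == 0: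
--         return format_to_json(form)
--
--     result = {widget_name: set() for widget_name in form}
--     for constraint in constraints:
--         # selected widgets that this constraint fails to satisfy
--         bad = [
--             sw
--             for sw in selection
--             if sw in constraint and not (selection[sw] & constraint[sw])
--         ]
--         for widget_name, widget_options in constraint.items():
--             if (
--                 widget_name in result
--                 and all(b == widget_name for b in bad)
--                 and any(sw != widget_name for sw in selection)
--             ):
--                 result[widget_name] |= widget_options
--
--     # a single-widget selection cannot restrict its own widget
--     if len(selection) == 1:
--         only_widget_in_selection = next(iter(selection))
--         result[only_widget_in_selection] = form[only_widget_in_selection]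
--
--     return format_to_json(result)
--
--
-- def format_to_json(result: dict[str, set[Any]]) -> dict[str, list[Any]]:
--     return {k: sorted(v) for (k, v) in result.items()}
-- ===== Notes on version B (the rewrite author's own statement) =====
-- stated objective: faster
-- what changed: Instead of building a per-selected-widget dict of per-widget option sets per constraint and aggregating them by intersection with an early break, B computes once per constraint the list 'bad' of selected widgets the constraint fails and unions constraint[widget] into the result exactly when bad - {widget} is empty and some other selected widget exists.
import Mathlib
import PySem

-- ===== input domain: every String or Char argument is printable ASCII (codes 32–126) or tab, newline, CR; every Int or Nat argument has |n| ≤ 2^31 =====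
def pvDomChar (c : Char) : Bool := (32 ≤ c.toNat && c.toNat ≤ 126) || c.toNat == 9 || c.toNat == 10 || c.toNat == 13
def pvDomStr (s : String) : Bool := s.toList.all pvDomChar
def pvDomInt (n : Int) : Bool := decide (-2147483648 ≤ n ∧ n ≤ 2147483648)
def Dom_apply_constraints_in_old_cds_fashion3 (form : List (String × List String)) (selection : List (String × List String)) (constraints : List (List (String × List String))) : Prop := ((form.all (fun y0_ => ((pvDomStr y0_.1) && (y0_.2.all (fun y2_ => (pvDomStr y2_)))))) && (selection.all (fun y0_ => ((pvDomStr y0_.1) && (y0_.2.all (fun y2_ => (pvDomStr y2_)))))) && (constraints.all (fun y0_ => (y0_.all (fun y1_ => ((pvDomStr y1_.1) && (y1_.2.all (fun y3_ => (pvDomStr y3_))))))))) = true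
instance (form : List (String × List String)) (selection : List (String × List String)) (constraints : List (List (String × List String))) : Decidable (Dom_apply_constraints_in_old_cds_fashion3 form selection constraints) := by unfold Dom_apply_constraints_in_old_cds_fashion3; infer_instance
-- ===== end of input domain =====

-- B replaces A's per-selected-widget dict-of-dicts and intersection aggregation by one validity check per constraint ('bad' selected widgets), for a simpler single pass per constraint.


-- ===== PORT A =====
-- Both Pythons receive dicts of sets; the association-list arguments are normalized once, as dict()/set() would.
def pvNorm (xs : List (String × List String)) : PySem.Dict String (PySem.Set String) :=
  PySem.Dict.ofList (xs.map (fun p => (p.1, PySem.Set.ofList p.2)))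

-- format_to_json (shared module-level helper of both Pythons)
def pvFmt (r : PySem.Dict String (PySem.Set String)) : List (String × List String) :=
  r.items.map (fun p => (p.1, PySem.List.sorted p.2 (fun x => x) false))

-- per_constraint_result[sw] = {} ; for widget_name in form: if widget_name != sw: ... = set()
def pvInitEntry (formKeys : List String) (sw : String) : PySem.Dict String (PySem.Set String) :=
  formKeys.foldl (fun d w => if w ≠ sw then d.insert w PySem.Set.empty else d) PySem.Dict.empty

-- Category 1 inner loop body (the 'widget_name != selected_widget_name' guarded update)
def pvCat1Upd (sw : String) (d : PySem.Dict String (PySem.Set String))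
    (p : String × PySem.Set String) : PySem.Dict String (PySem.Set String) :=
  if p.1 ≠ sw then
    (if d.contains p.1 then d.insert p.1 (PySem.Set.union (d.getD p.1 PySem.Set.empty) p.2)
     else d.insert p.1 (PySem.Set.ofList p.2))
  else d

-- Category 2 inner loop body
def pvCat2Upd (d : PySem.Dict String (PySem.Set String))
    (p : String × PySem.Set String) : PySem.Dict String (PySem.Set String) :=
  if d.contains p.1 then d.insert p.1 (PySem.Set.union (d.getD p.1 PySem.Set.empty) p.2)
  else d.insert p.1 (PySem.Set.ofList p.2)

-- body of 'for selected_widget_name, selected_widget_options in selection.items()'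
def pvSelStep (C : PySem.Dict String (PySem.Set String)) (formKeys : List String)
    (pcr : PySem.Dict String (PySem.Dict String (PySem.Set String)))
    (it : String × PySem.Set String) : PySem.Dict String (PySem.Dict String (PySem.Set String)) :=
  if C.contains it.1 then
    if (PySem.Set.inter it.2 (C.getD it.1 PySem.Set.empty)).length ≠ 0 then
      let pcr := if ¬ pcr.contains it.1 then pcr.insert it.1 (pvInitEntry formKeys it.1) else pcr
      pcr.insert it.1 (C.items.foldl (pvCat1Upd it.1) (pcr.getD it.1 PySem.Dict.empty))
    else pcr
  else
    let pcr := if ¬ pcr.contains it.1 then pcr.insert it.1 (pvInitEntry formKeys it.1) else pcr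
    pcr.insert it.1 (C.items.foldl pvCat2Upd (pcr.getD it.1 PySem.Dict.empty))

-- the aggregation loop over the selection, with its early 'break'
def pvAgg (pcr : PySem.Dict String (PySem.Dict String (PySem.Set String))) (w : String) :
    List String → PySem.Set String → PySem.Set String
  | [], agg => agg
  | sw :: rest, agg =>
    if w ≠ sw then
      match pcr.get? sw with
      | some d =>
          pvAgg pcr w rest
            (if agg.length ≠ 0 then PySem.Set.inter agg (d.getD w PySem.Set.empty)
             else d.getD w PySem.Set.empty)
      | none => PySem.Set.empty
    else pvAgg pcr w rest agg

-- body of 'for constraint in constraints'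
def pvStepA (formD selD : PySem.Dict String (PySem.Set String))
    (result : PySem.Dict String (PySem.Set String)) (c : List (String × List String)) :
    PySem.Dict String (PySem.Set String) :=
  let C := pvNorm c
  let pcr := selD.items.foldl (pvSelStep C formD.keys) PySem.Dict.empty
  formD.keys.foldl (fun r w =>
    let agg := pvAgg pcr w selD.keys PySem.Set.empty
    if r.contains w then r.insert w (PySem.Set.union (r.getD w PySem.Set.empty) agg)
    else r.insert w agg) result

def apply_constraints_in_old_cds_fashion3 (form : List (String × List String)) (selection : List (String × List String)) (constraints : List (List (String × List String))) : List (String × List String) :=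
  let formD := pvNorm form
  let selD := pvNorm selection
  if selD.size = 0 then pvFmt formD else
  let result := constraints.foldl (pvStepA formD selD) PySem.Dict.empty
  let result := formD.keys.foldl
    (fun r w => if ¬ r.contains w then r.insert w PySem.Set.empty else r) result
  let result := if selD.size = 1 then
      (match selD.keys with
       | only :: _ => result.insert only (formD.getD only PySem.Set.empty)  -- form[only]; Pre_ guarantees the key (Python raises KeyError otherwise)
       | [] => result)
    else result
  pvFmt result

-- ===== PORT B =====
-- bad = [sw for sw in selection if sw in constraint and not (selection[sw] & constraint[sw])]
def pvBad (selD C : PySem.Dict String (PySem.Set String)) : List String :=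
  selD.keys.filter (fun sw =>
    C.contains sw && (PySem.Set.inter (selD.getD sw PySem.Set.empty) (C.getD sw PySem.Set.empty)).isEmpty)

-- body of B's 'for constraint in constraints'
def pvStepB (selD : PySem.Dict String (PySem.Set String))
    (result : PySem.Dict String (PySem.Set String)) (c : List (String × List String)) :
    PySem.Dict String (PySem.Set String) :=
  let C := pvNorm c
  let bad := pvBad selD C
  C.items.foldl (fun r p =>
    if r.contains p.1 && (bad.all (fun b => b == p.1) && selD.keys.any (fun sw => sw != p.1)) then
      r.insert p.1 (PySem.Set.union (r.getD p.1 PySem.Set.empty) p.2)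
    else r) result

def apply_constraints_in_old_cds_fashion3_alt (form : List (String × List String)) (selection : List (String × List String)) (constraints : List (List (String × List String))) : List (String × List String) :=
  let formD := pvNorm form
  let selD := pvNorm selection
  if selD.size = 0 then pvFmt formD else
  let result0 := formD.keys.foldl (fun r w => r.insert w PySem.Set.empty) PySem.Dict.empty
  let result := constraints.foldl (pvStepB selD) result0
  let result := if selD.size = 1 then
      (match selD.keys with
       | only :: _ => result.insert only (formD.getD only PySem.Set.empty)  -- form[only]; Pre_ guarantees the key
       | [] => result)
    else result
  pvFmt result

-- ===== PRECONDITION & SPEC =====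
-- Pre_ excludes exactly the inputs on which Python A raises: a selection with exactly one
-- distinct key that does not occur among form's keys (then 'form[only_widget_in_selection]'
-- raises KeyError in A, and B raises the same KeyError).
def Pre_apply_constraints_in_old_cds_fashion3 (form : List (String × List String)) (selection : List (String × List String)) (constraints : List (List (String × List String))) : Prop :=
  (PySem.List.dedup (selection.map Prod.fst)).length = 1 →
    ∀ k ∈ selection.map Prod.fst, k ∈ form.map Prod.fst
instance (form : List (String × List String)) (selection : List (String × List String)) (constraints : List (List (String × List String))) : Decidable (Pre_apply_constraints_in_old_cds_fashion3 form selection constraints) := by unfold Pre_apply_constraints_in_old_cds_fashion3; infer_instance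
def pvWitness_apply_constraints_in_old_cds_fashion3 : (List (String × List String)) × (List (String × List String)) × (List (List (String × List String))) :=
  ([("a", ["x", "y"]), ("b", ["z"])], [("a", ["y"])], [[("a", ["y"]), ("b", ["z"])]])
def Spec_apply_constraints_in_old_cds_fashion3 (form : List (String × List String)) (selection : List (String × List String)) (constraints : List (List (String × List String))) (out : List (String × List String)) : Prop := out = apply_constraints_in_old_cds_fashion3_alt form selection constraints
instance (form : List (String × List String)) (selection : List (String × List String)) (constraints : List (List (String × List String))) (out : List (String × List String)) : Decidable (Spec_apply_constraints_in_old_cds_fashion3 form selection constraints out) := by unfold Spec_apply_constraints_in_old_cds_fashion3; infer_instance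

-- ===== CLAIM (what is proved, stated in full; the proofs are below) =====
def Claim_equal_apply_constraints_in_old_cds_fashion3 : Prop := ∀ (form : List (String × List String)) (selection : List (String × List String)) (constraints : List (List (String × List String))), Dom_apply_constraints_in_old_cds_fashion3 form selection constraints → Pre_apply_constraints_in_old_cds_fashion3 form selection constraints → Spec_apply_constraints_in_old_cds_fashion3 form selection constraints (apply_constraints_in_old_cds_fashion3 form selection constraints)

-- ===== LEMMAS AND PROOFS =====

-- ===== proof-only helpers =====

-- the per-constraint per-widget validity condition of B, as a Bool
def pvCondB (selD C : PySem.Dict String (PySem.Set String)) (w : String) : Bool :=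
  (pvBad selD C).all (fun b => b == w) && selD.keys.any (fun sw => sw != w)

-- the per-constraint contribution of constraint C to widget w
def pvGB (selD C : PySem.Dict String (PySem.Set String)) (w : String) : PySem.Set String :=
  if C.contains w && pvCondB selD C w then C.getD w PySem.Set.empty else []

-- "constraint C rules out selected widget sw"
def pvBadKeyB (selD C : PySem.Dict String (PySem.Set String)) (sw : String) : Bool :=
  C.contains sw && ((PySem.Set.inter (selD.getD sw PySem.Set.empty) (C.getD sw PySem.Set.empty)).length == 0)

def pvBadKey (selD C : PySem.Dict String (PySem.Set String)) (sw : String) : Prop :=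
  pvBadKeyB selD C sw = true

-- ## generic dict facts

lemma pv_keys_items_fst (d : PySem.Dict String (PySem.Set String)) : d.keys = d.items.map Prod.fst := rfl

lemma pv_norm_get?_nodup (xs : List (String × List String)) (k : String) (v : PySem.Set String)
    (h : (pvNorm xs).get? k = some v) : v.Nodup := by
  have main : ∀ (l : List (String × PySem.Set String)) (d : PySem.Dict String (PySem.Set String)),
      (∀ k v, d.get? k = some v → v.Nodup) → (∀ p ∈ l, (p.2 : List String).Nodup) →
      ∀ k v, (l.foldl (fun a p => a.insert p.1 p.2) d).get? k = some v → v.Nodup := by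
    intro l
    induction l with
    | nil => intro d hd _ k v h; exact hd k v h
    | cons p t ih =>
      intro d hd hl k v h
      refine ih (d.insert p.1 p.2) ?_ (fun q hq => hl q (by simp [hq])) k v h
      intro k' v' h'
      rw [PySem.Dict.get?_insert] at h'
      split at h'
      · cases h'; exact hl p (by simp)
      · exact hd k' v' h'
  have : pvNorm xs = (xs.map (fun p => (p.1, PySem.Set.ofList p.2))).foldl
      (fun a p => a.insert p.1 p.2) PySem.Dict.empty := rfl
  rw [this] at h
  refine main _ _ (fun k v h => by simp [PySem.Dict.get?_empty] at h) ?_ k v h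
  intro p hp
  rcases List.mem_map.mp hp with ⟨q, _, rfl⟩
  exact PySem.Set.nodup_ofList q.2

lemma pv_norm_getD_nodup (xs : List (String × List String)) (w : String) :
    ((pvNorm xs).getD w PySem.Set.empty).Nodup := by
  rw [PySem.Dict.getD_eq_get?_getD]
  cases h : (pvNorm xs).get? w with
  | none => simp [PySem.Set.empty]
  | some v => simpa using pv_norm_get?_nodup xs w v h

-- ## small set facts

lemma pv_inter_self {s : List String} : PySem.Set.inter s s = s := by
  apply List.filter_eq_self.mpr
  intro a ha
  simpa [PySem.Set.contains] using ha

lemma pv_union_nil_left (s : PySem.Set String) : PySem.Set.union [] s = PySem.Set.ofList s := by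
  simpa [PySem.Set.union] using PySem.Set.update_nil_left s

lemma pv_union_nil_right (s : PySem.Set String) : PySem.Set.union s [] = s := rfl
-- ## the per-selected-widget entry dicts

lemma pv_set_empty : (PySem.Set.empty : PySem.Set String) = [] := rfl

lemma pv_snoc_fst_nodup {t : List (String × PySem.Set String)} {p : String × PySem.Set String}
    (h : ((t ++ [p]).map Prod.fst).Nodup) : (t.map Prod.fst).Nodup ∧ p.1 ∉ t.map Prod.fst := by
  simp only [List.map_append, List.map_cons, List.map_nil] at h
  rw [List.nodup_append] at h
  exact ⟨h.1, fun hm => h.2.2 p.1 hm p.1 (by simp) rfl⟩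

lemma pv_find?_none_of_not_mem_fst {t : List (String × PySem.Set String)} {k : String}
    (h : k ∉ t.map Prod.fst) : t.find? (fun q => q.1 == k) = none := by
  rw [List.find?_eq_none]
  intro q hq hbe
  exact h ((beq_iff_eq.mp hbe) ▸ List.mem_map_of_mem hq)

lemma pv_find?_snoc_ne {t : List (String × PySem.Set String)} {p : String × PySem.Set String} {w : String}
    (h : ¬ p.1 = w) :
    (t ++ [p]).find? (fun q => q.1 == w) = t.find? (fun q => q.1 == w) := by
  rw [List.find?_append]
  cases hft : t.find? (fun q => q.1 == w) with
  | some q => rfl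
  | none => simp [h]

lemma pv_find?_snoc_self {t : List (String × PySem.Set String)} {p : String × PySem.Set String}
    (h : t.find? (fun q => q.1 == p.1) = none) :
    (t ++ [p]).find? (fun q => q.1 == p.1) = some p := by
  rw [List.find?_append, h]
  simp

lemma pv_initEntry_getD (K : List String) (sw w : String) :
    (pvInitEntry K sw).getD w PySem.Set.empty = [] := by
  have main : ∀ (L : List String) (d : PySem.Dict String (PySem.Set String)),
      (∀ w, d.getD w PySem.Set.empty = []) →
      ∀ w, (L.foldl (fun d w => if w ≠ sw then d.insert w PySem.Set.empty else d) d).getD w PySem.Set.empty = [] := by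
    intro L
    induction L with
    | nil => intro d hd w; exact hd w
    | cons x t ih =>
      intro d hd w
      simp only [List.foldl_cons]
      refine ih _ ?_ w
      intro w'
      by_cases hx : x ≠ sw
      · rw [if_pos hx, PySem.Dict.getD_insert]
        split
        · rfl
        · exact hd w'
      · rw [if_neg hx]
        exact hd w'
  exact main K PySem.Dict.empty (fun w => by rw [PySem.Dict.getD_eq_get?_getD, PySem.Dict.get?_empty]; rfl) w

lemma pv_cat1_getD (sw : String) (ps : List (String × PySem.Set String))
    (hnd : (ps.map Prod.fst).Nodup) (hv : ∀ p ∈ ps, (p.2 : List String).Nodup)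
    (d : PySem.Dict String (PySem.Set String)) (hd : ∀ w, d.getD w PySem.Set.empty = []) :
    ∀ w, (ps.foldl (pvCat1Upd sw) d).getD w PySem.Set.empty =
      if w = sw then [] else ((ps.find? (fun p => p.1 == w)).map Prod.snd).getD [] := by
  induction ps using List.reverseRecOn with
  | nil =>
    intro w
    simp only [List.foldl_nil, List.find?_nil, Option.map_none, Option.getD_none]
    split <;> exact hd w
  | append_singleton t p ih =>
    obtain ⟨hnd', hp1⟩ := pv_snoc_fst_nodup hnd
    have ihs := ih hnd' (fun q hq => hv q (by simp [hq]))
    have hfnone : t.find? (fun q => q.1 == p.1) = none := pv_find?_none_of_not_mem_fst hp1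
    intro w
    rw [List.foldl_append]
    simp only [List.foldl_cons, List.foldl_nil]
    set R := t.foldl (pvCat1Upd sw) d with hR
    by_cases hps : p.1 = sw
    · have hstep : pvCat1Upd sw R p = R := by unfold pvCat1Upd; simp [hps]
      rw [hstep, ihs w]
      by_cases hws : w = sw
      · rw [if_pos hws, if_pos hws]
      · rw [if_neg hws, if_neg hws, pv_find?_snoc_ne (fun h : p.1 = w => hws (h ▸ hps))]
    · have hRp : R.getD p.1 PySem.Set.empty = [] := by
        rw [ihs p.1, if_neg hps, hfnone]; rfl
      have hstep : pvCat1Upd sw R p = R.insert p.1 p.2 := by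
        unfold pvCat1Upd
        have hofl : PySem.Set.ofList p.2 = p.2 := PySem.Set.ofList_eq_self_of_nodup _ (hv p (by simp))
        rw [if_pos hps]
        by_cases hc : R.contains p.1 = true
        · rw [if_pos hc, hRp, pv_union_nil_left, hofl]
        · rw [if_neg hc, hofl]
      rw [hstep, PySem.Dict.getD_insert]
      by_cases hwp : w = p.1
      · subst hwp
        rw [if_pos rfl, if_neg hps, pv_find?_snoc_self hfnone]
        rfl
      · rw [if_neg hwp, ihs w]
        by_cases hws : w = sw
        · rw [if_pos hws, if_pos hws]
        · rw [if_neg hws, if_neg hws, pv_find?_snoc_ne (fun h : p.1 = w => hwp h.symm)]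

lemma pv_cat2_getD (ps : List (String × PySem.Set String))
    (hnd : (ps.map Prod.fst).Nodup) (hv : ∀ p ∈ ps, (p.2 : List String).Nodup)
    (d : PySem.Dict String (PySem.Set String)) (hd : ∀ w, d.getD w PySem.Set.empty = []) :
    ∀ w, (ps.foldl pvCat2Upd d).getD w PySem.Set.empty =
      ((ps.find? (fun p => p.1 == w)).map Prod.snd).getD [] := by
  induction ps using List.reverseRecOn with
  | nil =>
    intro w
    simp only [List.foldl_nil, List.find?_nil, Option.map_none, Option.getD_none]
    exact hd w
  | append_singleton t p ih =>
    obtain ⟨hnd', hp1⟩ := pv_snoc_fst_nodup hnd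
    have ihs := ih hnd' (fun q hq => hv q (by simp [hq]))
    have hfnone : t.find? (fun q => q.1 == p.1) = none := pv_find?_none_of_not_mem_fst hp1
    intro w
    rw [List.foldl_append]
    simp only [List.foldl_cons, List.foldl_nil]
    set R := t.foldl pvCat2Upd d with hR
    have hRp : R.getD p.1 PySem.Set.empty = [] := by
      rw [ihs p.1, hfnone]; rfl
    have hstep : pvCat2Upd R p = R.insert p.1 p.2 := by
      unfold pvCat2Upd
      have hofl : PySem.Set.ofList p.2 = p.2 := PySem.Set.ofList_eq_self_of_nodup _ (hv p (by simp))
      by_cases hc : R.contains p.1 = true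
      · rw [if_pos hc, hRp, pv_union_nil_left, hofl]
      · rw [if_neg hc, hofl]
    rw [hstep, PySem.Dict.getD_insert]
    by_cases hwp : w = p.1
    · subst hwp
      rw [if_pos rfl, pv_find?_snoc_self hfnone]
      rfl
    · rw [if_neg hwp, ihs w, pv_find?_snoc_ne (fun h : p.1 = w => hwp h.symm)]
-- ## the per-constraint pcr dict

def pvBadPairB (C : PySem.Dict String (PySem.Set String)) (p : String × PySem.Set String) : Bool :=
  C.contains p.1 && ((PySem.Set.inter p.2 (C.getD p.1 PySem.Set.empty)).length == 0)

lemma pv_selStep_fresh (C : PySem.Dict String (PySem.Set String)) (K : List String)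
    (R : PySem.Dict String (PySem.Dict String (PySem.Set String)))
    (p : String × PySem.Set String) (h : R.contains p.1 = false) :
    pvSelStep C K R p =
      if C.contains p.1 = true then
        (if (PySem.Set.inter p.2 (C.getD p.1 PySem.Set.empty)).length ≠ 0 then
          (R.insert p.1 (pvInitEntry K p.1)).insert p.1 (C.items.foldl (pvCat1Upd p.1) (pvInitEntry K p.1))
        else R)
      else (R.insert p.1 (pvInitEntry K p.1)).insert p.1 (C.items.foldl pvCat2Upd (pvInitEntry K p.1)) := by
  unfold pvSelStep
  have hg : (R.insert p.1 (pvInitEntry K p.1)).getD p.1 PySem.Dict.empty = pvInitEntry K p.1 := by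
    rw [PySem.Dict.getD_eq_get?_getD, PySem.Dict.get?_insert_self]; rfl
  have hnf : ¬ (false : Bool) = true := by simp
  simp only [h, if_pos hnf, hg]

lemma pv_pcr_char (C : PySem.Dict String (PySem.Set String)) (K : List String)
    (hCnd : (C.items.map Prod.fst).Nodup) (hCv : ∀ p ∈ C.items, (p.2 : List String).Nodup)
    (ps : List (String × PySem.Set String)) (hnd : (ps.map Prod.fst).Nodup) :
    (∀ sw, (ps.foldl (pvSelStep C K) PySem.Dict.empty).get? sw = none ↔
        (∀ p ∈ ps, p.1 = sw → pvBadPairB C p = true)) ∧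
    (∀ sw d, (ps.foldl (pvSelStep C K) PySem.Dict.empty).get? sw = some d →
        ∀ w, w ≠ sw → d.getD w PySem.Set.empty = C.getD w PySem.Set.empty) := by
  induction ps using List.reverseRecOn with
  | nil =>
    constructor
    · intro sw; simp [PySem.Dict.get?_empty]
    · intro sw d h; rw [List.foldl_nil, PySem.Dict.get?_empty] at h; cases h
  | append_singleton t p ih =>
    obtain ⟨hnd', hp1⟩ := pv_snoc_fst_nodup hnd
    obtain ⟨ih1, ih2⟩ := ih hnd'
    set R := t.foldl (pvSelStep C K) PySem.Dict.empty with hR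
    have hfresh : R.get? p.1 = none := by
      rw [ih1]
      intro q hq hq1
      exact absurd (hq1 ▸ List.mem_map_of_mem hq) hp1
    have hcont : R.contains p.1 = false := (PySem.Dict.get?_eq_none_iff_contains R p.1).mp hfresh
    have hstep := pv_selStep_fresh C K R p hcont
    have hEgetD1 : ∀ w, w ≠ p.1 →
        (C.items.foldl (pvCat1Upd p.1) (pvInitEntry K p.1)).getD w PySem.Set.empty = C.getD w PySem.Set.empty := by
      intro w hw
      rw [pv_cat1_getD p.1 C.items hCnd hCv _ (pv_initEntry_getD K p.1) w, if_neg hw]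
      rw [PySem.Dict.getD_eq_get?_getD]
      rfl
    have hEgetD2 : ∀ w, w ≠ p.1 →
        (C.items.foldl pvCat2Upd (pvInitEntry K p.1)).getD w PySem.Set.empty = C.getD w PySem.Set.empty := by
      intro w hw
      rw [pv_cat2_getD C.items hCnd hCv _ (pv_initEntry_getD K p.1) w]
      rw [PySem.Dict.getD_eq_get?_getD]
      rfl
    rw [List.foldl_append]
    simp only [List.foldl_cons, List.foldl_nil, ← hR, hstep]
    by_cases hb : pvBadPairB C p = true
    · -- the constraint rules p out: pcr unchanged
      have hbc : C.contains p.1 = true := by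
        unfold pvBadPairB at hb; exact (Bool.and_eq_true_iff.mp hb).1
      have hblen : ¬ (PySem.Set.inter p.2 (C.getD p.1 PySem.Set.empty)).length ≠ 0 := by
        unfold pvBadPairB at hb
        have := (Bool.and_eq_true_iff.mp hb).2
        simpa using this
      rw [if_pos hbc, if_neg hblen]
      constructor
      · intro sw
        rw [ih1]
        constructor
        · intro h q hq hq1
          rcases List.mem_append.mp hq with hq | hq
          · exact h q hq hq1
          · have : q = p := by simpa using hq
            exact this ▸ hb
        · intro h q hq hq1
          exact h q (List.mem_append.mpr (Or.inl hq)) hq1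
      · exact ih2
    · -- p enters pcr with a fully characterised entry
      have hmain : ∀ (E : PySem.Dict String (PySem.Set String)),
          (∀ w, w ≠ p.1 → E.getD w PySem.Set.empty = C.getD w PySem.Set.empty) →
          (∀ sw, ((R.insert p.1 (pvInitEntry K p.1)).insert p.1 E).get? sw = none ↔
              (∀ q ∈ t ++ [p], q.1 = sw → pvBadPairB C q = true)) ∧
          (∀ sw d, ((R.insert p.1 (pvInitEntry K p.1)).insert p.1 E).get? sw = some d →
              ∀ w, w ≠ sw → d.getD w PySem.Set.empty = C.getD w PySem.Set.empty) := by
        intro E hE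
        constructor
        · intro sw
          by_cases hsw : sw = p.1
          · subst hsw
            rw [PySem.Dict.get?_insert_self]
            exact ⟨fun h => absurd h (by simp),
                   fun h => absurd (h p (List.mem_append.mpr (Or.inr (by simp))) rfl) hb⟩
          · rw [PySem.Dict.get?_insert_of_ne _ _ hsw, PySem.Dict.get?_insert_of_ne _ _ hsw, ih1]
            constructor
            · intro h q hq hq1
              rcases List.mem_append.mp hq with hq | hq
              · exact h q hq hq1
              · have hqp : q = p := by simpa using hq
                exact absurd (hqp ▸ hq1).symm hsw
            · intro h q hq hq1
              exact h q (List.mem_append.mpr (Or.inl hq)) hq1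
        · intro sw d hd w hw
          by_cases hsw : sw = p.1
          · subst hsw
            rw [PySem.Dict.get?_insert_self] at hd
            cases hd
            exact hE w hw
          · rw [PySem.Dict.get?_insert_of_ne _ _ hsw, PySem.Dict.get?_insert_of_ne _ _ hsw] at hd
            exact ih2 sw d hd w hw
      by_cases hbc : C.contains p.1 = true
      · have hblen : (PySem.Set.inter p.2 (C.getD p.1 PySem.Set.empty)).length ≠ 0 := by
          intro hlen
          exact hb (by unfold pvBadPairB; rw [hbc]; simpa using hlen)
        rw [if_pos hbc, if_pos hblen]
        exact hmain _ hEgetD1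
      · rw [if_neg hbc]
        exact hmain _ hEgetD2
-- ## the aggregation loop

lemma pvAgg_cons (pcr : PySem.Dict String (PySem.Dict String (PySem.Set String)))
    (w sw : String) (rest : List String) (agg : PySem.Set String) :
    pvAgg pcr w (sw :: rest) agg =
      if w ≠ sw then
        (match pcr.get? sw with
         | some d => pvAgg pcr w rest
             (if agg.length ≠ 0 then PySem.Set.inter agg (d.getD w PySem.Set.empty)
              else d.getD w PySem.Set.empty)
         | none => PySem.Set.empty)
      else pvAgg pcr w rest agg := rfl

lemma pv_badpair_key {selD C : PySem.Dict String (PySem.Set String)} {p : String × PySem.Set String}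
    (hnd : selD.keys.Nodup) (hp : p ∈ selD.items) :
    pvBadPairB C p = true ↔ pvBadKey selD C p.1 := by
  have hget : selD.get? p.1 = some p.2 := PySem.Dict.get?_of_mem_items selD (by cases p; exact hp) hnd
  have hgd : selD.getD p.1 PySem.Set.empty = p.2 := by
    rw [PySem.Dict.getD_eq_get?_getD, hget]; rfl
  unfold pvBadPairB pvBadKey pvBadKeyB
  rw [hgd]

lemma pv_pcr_key_none (selD C : PySem.Dict String (PySem.Set String)) (K : List String)
    (hnd : selD.keys.Nodup) (hCnd : (C.items.map Prod.fst).Nodup) (hCv : ∀ p ∈ C.items, (p.2 : List String).Nodup) :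
    ∀ sw, (selD.items.foldl (pvSelStep C K) PySem.Dict.empty).get? sw = none ↔
      (sw ∉ selD.keys ∨ pvBadKey selD C sw) := by
  intro sw
  rw [(pv_pcr_char C K hCnd hCv selD.items hnd).1 sw]
  constructor
  · intro h
    by_cases hk : sw ∈ selD.keys
    · right
      rcases List.mem_map.mp hk with ⟨p, hp, hp1⟩
      exact hp1 ▸ (pv_badpair_key hnd hp).mp (h p hp hp1)
    · exact Or.inl hk
  · intro h p hp hp1
    rcases h with h | h
    · exact absurd (hp1 ▸ List.mem_map_of_mem hp) h
    · exact (pv_badpair_key hnd hp).mpr (hp1 ▸ h)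

lemma pv_agg_char (pcr : PySem.Dict String (PySem.Dict String (PySem.Set String)))
    (selD C : PySem.Dict String (PySem.Set String))
    (H1 : ∀ sw, pcr.get? sw = none ↔ (sw ∉ selD.keys ∨ pvBadKey selD C sw))
    (H2 : ∀ sw d, pcr.get? sw = some d → ∀ w', w' ≠ sw → d.getD w' PySem.Set.empty = C.getD w' PySem.Set.empty) :
    ∀ (names : List String) (w : String), (∀ sw ∈ names, sw ∈ selD.keys) →
      ∀ agg, (agg = [] ∨ agg = C.getD w PySem.Set.empty) →
      pvAgg pcr w names agg =
        if names.any (fun sw => (sw != w) && pvBadKeyB selD C sw) then []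
        else if names.all (fun sw => sw == w) then agg
        else C.getD w PySem.Set.empty := by
  intro names
  induction names with
  | nil => intro w _ agg _; simp [pvAgg]
  | cons sw rest ih =>
    intro w hmem agg hagg
    by_cases hws : w = sw
    · subst hws
      have h1 : ¬ (w ≠ w) := fun h => h rfl
      rw [pvAgg_cons, if_neg h1, ih w (fun s hs => hmem s (List.mem_cons_of_mem _ hs)) agg hagg]
      simp
    · have hne : w ≠ sw := hws
      have hsk : sw ∈ selD.keys := hmem sw (by simp)
      by_cases hbad : pvBadKey selD C sw
      · have hnone : pcr.get? sw = none := (H1 sw).mpr (Or.inr hbad)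
        rw [pvAgg_cons, if_pos hne, hnone]
        have hany : (sw :: rest).any (fun sw => (sw != w) && pvBadKeyB selD C sw) = true := by
          simp only [List.any_cons, Bool.or_eq_true]
          left
          have hbad' : pvBadKeyB selD C sw = true := hbad
          simp [Ne.symm hne, hbad']
        rw [if_pos hany]
        rfl
      · obtain ⟨d, hd⟩ : ∃ d, pcr.get? sw = some d := by
          cases h : pcr.get? sw with
          | none =>
            rcases (H1 sw).mp h with h' | h'
            · exact absurd hsk h'
            · exact absurd h' hbad
          | some d => exact ⟨d, rfl⟩
        have hread : d.getD w PySem.Set.empty = C.getD w PySem.Set.empty := H2 sw d hd w hne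
        have hagg' : (if agg.length ≠ 0 then PySem.Set.inter agg (d.getD w PySem.Set.empty)
            else d.getD w PySem.Set.empty) = C.getD w PySem.Set.empty := by
          rw [hread]
          rcases hagg with rfl | rfl
          · simp
          · by_cases hSe : (C.getD w PySem.Set.empty : List String).length ≠ 0
            · rw [if_pos hSe, pv_inter_self]
            · rw [if_neg hSe]
        rw [pvAgg_cons, if_pos hne, hd]
        show pvAgg pcr w rest (if agg.length ≠ 0 then PySem.Set.inter agg (d.getD w PySem.Set.empty)
            else d.getD w PySem.Set.empty) = _
        rw [hagg', ih w (fun s hs => hmem s (List.mem_cons_of_mem _ hs)) _ (Or.inr rfl)]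
        have hcons_any : (sw :: rest).any (fun sw => (sw != w) && pvBadKeyB selD C sw)
            = rest.any (fun sw => (sw != w) && pvBadKeyB selD C sw) := by
          simp only [List.any_cons]
          have hbad' : pvBadKeyB selD C sw = false := Bool.eq_false_iff.mpr hbad
          simp [hbad']
        rw [hcons_any]
        by_cases ha : rest.any (fun sw => (sw != w) && pvBadKeyB selD C sw) = true
        · rw [if_pos ha, if_pos ha]
        · rw [if_neg ha, if_neg ha]
          have hconsall : (sw :: rest).all (fun s => s == w) = false := by
            simp only [List.all_cons, Bool.and_eq_false_iff]
            left
            simp [Ne.symm hne]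
          rw [hconsall, if_neg Bool.false_ne_true]
          split <;> rfl
-- ## A's aggregate equals B's per-constraint contribution

lemma pv_mem_bad {selD C : PySem.Dict String (PySem.Set String)} {sw : String} :
    sw ∈ pvBad selD C ↔ sw ∈ selD.keys ∧ pvBadKey selD C sw := by
  unfold pvBad pvBadKey pvBadKeyB
  rw [List.mem_filter]
  simp [List.isEmpty_iff, List.length_eq_zero_iff]

lemma pv_gA_eq_gB (selD C : PySem.Dict String (PySem.Set String))
    (pcr : PySem.Dict String (PySem.Dict String (PySem.Set String)))
    (H1 : ∀ sw, pcr.get? sw = none ↔ (sw ∉ selD.keys ∨ pvBadKey selD C sw))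
    (H2 : ∀ sw d, pcr.get? sw = some d → ∀ w', w' ≠ sw → d.getD w' PySem.Set.empty = C.getD w' PySem.Set.empty)
    (w : String) :
    pvAgg pcr w selD.keys PySem.Set.empty = pvGB selD C w := by
  rw [show (PySem.Set.empty : PySem.Set String) = [] from rfl,
      pv_agg_char pcr selD C H1 H2 selD.keys w (fun s hs => hs) [] (Or.inl rfl)]
  unfold pvGB pvCondB
  by_cases hA : selD.keys.any (fun sw => (sw != w) && pvBadKeyB selD C sw) = true
  · rw [if_pos hA]
    have hallf : (pvBad selD C).all (fun b => b == w) = false := by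
      rcases List.any_eq_true.mp hA with ⟨sw, hsw, hcond⟩
      rcases Bool.and_eq_true_iff.mp hcond with ⟨hne, hbad⟩
      exact List.all_eq_false.mpr ⟨sw, pv_mem_bad.mpr ⟨hsw, hbad⟩, by simpa using hne⟩
    rw [hallf]
    simp
  · rw [if_neg hA]
    have hallb : (pvBad selD C).all (fun b => b == w) = true := by
      rw [List.all_eq_true]
      intro b hb
      rcases pv_mem_bad.mp hb with ⟨hbk, hbad⟩
      by_contra hbw
      apply hA
      refine List.any_eq_true.mpr ⟨b, hbk, ?_⟩
      have hbne : b ≠ w := by simpa using hbw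
      have hbad' : pvBadKeyB selD C b = true := hbad
      simp [hbne, hbad']
    by_cases hL : selD.keys.all (fun sw => sw == w) = true
    · rw [if_pos hL]
      have hanyf : selD.keys.any (fun sw => sw != w) = false := by
        rw [List.any_eq_false]
        intro sw hsw
        have : sw = w := by simpa using List.all_eq_true.mp hL sw hsw
        simp [this]
      rw [hallb, hanyf]
      simp
    · rw [if_neg hL]
      have hanyt : selD.keys.any (fun sw => sw != w) = true := by
        rcases List.all_eq_false.mp (Bool.eq_false_iff.mpr hL) with ⟨sw, hsw, hswf⟩
        exact List.any_eq_true.mpr ⟨sw, hsw, by simpa using hswf⟩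
      rw [hallb, hanyt]
      by_cases hc : C.contains w = true
      · simp [hc]
      · have hge : C.getD w PySem.Set.empty = PySem.Set.empty :=
          PySem.Dict.getD_of_not_contains C _ (Bool.not_eq_true _ ▸ hc)
        simp only [hc]
        simp only [Bool.false_and, if_neg Bool.false_ne_true]
        exact hge
-- ## items characterisation of the result-dict updates

lemma pv_find?_key_map (l : List (String × PySem.Set String))
    (f : (String × PySem.Set String) → (String × PySem.Set String))
    (hf : ∀ it, (f it).1 = it.1) (w : String)
    (hu : ∀ it ∈ l, it.1 = w → f it = it) :
    List.find? (fun q => q.1 == w) (l.map f) = List.find? (fun q => q.1 == w) l := by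
  induction l with
  | nil => rfl
  | cons a t ih =>
    by_cases hpa : a.1 = w
    · rw [List.map_cons,
        List.find?_cons_of_pos (by simp [hf, hpa]),
        List.find?_cons_of_pos (by simp [hpa]),
        hu a (by simp) hpa]
    · rw [List.map_cons,
        List.find?_cons_of_neg (by simp [hf, hpa]),
        List.find?_cons_of_neg (by simp [hpa])]
      exact ih (fun it hit hw => hu it (by simp [hit]) hw)

lemma pv_keys_mk_map (r : PySem.Dict String (PySem.Set String))
    (f : (String × PySem.Set String) → (String × PySem.Set String))
    (hf : ∀ it, (f it).1 = it.1) :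
    (PySem.Dict.mk (r.items.map f)).keys = r.keys := by
  show (r.items.map f).map (fun x => x.1) = r.items.map (fun x => x.1)
  rw [List.map_map]
  exact List.map_congr_left (fun it _ => hf it)

lemma pv_get?_mk_map (r : PySem.Dict String (PySem.Set String))
    (f : (String × PySem.Set String) → (String × PySem.Set String))
    (hf : ∀ it, (f it).1 = it.1) (w : String)
    (hu : ∀ it ∈ r.items, it.1 = w → f it = it) :
    (PySem.Dict.mk (r.items.map f)).get? w = r.get? w := by
  show Option.map _ (List.find? _ (r.items.map f)) = Option.map _ (List.find? _ r.items)
  rw [pv_find?_key_map r.items f hf w hu]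

def pvUpd (g : String → PySem.Set String) (L : List String) (it : String × PySem.Set String) :
    String × PySem.Set String :=
  if it.1 ∈ L then (it.1, PySem.Set.union it.2 (g it.1)) else it

lemma pvUpd_fst (g : String → PySem.Set String) (L : List String) (it : String × PySem.Set String) :
    (pvUpd g L it).1 = it.1 := by
  unfold pvUpd; split <;> rfl

lemma pvUpd_nil (g : String → PySem.Set String) (it : String × PySem.Set String) :
    pvUpd g [] it = it := by
  unfold pvUpd; rw [if_neg (by simp)]

lemma pvUpd_of_not_mem (g : String → PySem.Set String) {L : List String}
    {it : String × PySem.Set String} (h : it.1 ∉ L) : pvUpd g L it = it := by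
  unfold pvUpd; rw [if_neg h]

lemma pvUpd_of_mem (g : String → PySem.Set String) {L : List String}
    {it : String × PySem.Set String} (h : it.1 ∈ L) :
    pvUpd g L it = (it.1, PySem.Set.union it.2 (g it.1)) := by
  unfold pvUpd; rw [if_pos h]

lemma pv_foldK_items (g : String → PySem.Set String) (r : PySem.Dict String (PySem.Set String))
    (hnd : r.keys.Nodup) :
    ∀ (L : List String), L.Nodup → (∀ w ∈ L, r.contains w = true) →
      (L.foldl (fun r' w => if r'.contains w then
          r'.insert w (PySem.Set.union (r'.getD w PySem.Set.empty) (g w))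
        else r'.insert w (g w)) r).items
      = r.items.map (pvUpd g L) := by
  intro L
  induction L using List.reverseRecOn with
  | nil =>
    intro _ _
    rw [List.foldl_nil, List.map_congr_left (fun it _ => pvUpd_nil g it)]
    exact (List.map_id' r.items).symm
  | append_singleton ps w0 ih =>
    intro hL hcont
    have hps : ps.Nodup := (List.nodup_append.mp hL).1
    have hw0 : w0 ∉ ps := by
      have h := (List.nodup_append.mp hL).2.2
      exact fun hm => h w0 hm w0 (by simp) rfl
    have ihs := ih hps (fun w hw => hcont w (List.mem_append.mpr (Or.inl hw)))
    rw [List.foldl_append]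
    simp only [List.foldl_cons, List.foldl_nil]
    have hReq : (ps.foldl (fun r' w => if r'.contains w then
          r'.insert w (PySem.Set.union (r'.getD w PySem.Set.empty) (g w))
        else r'.insert w (g w)) r) = PySem.Dict.mk (r.items.map (pvUpd g ps)) :=
      PySem.Dict.ext ihs
    rw [hReq]
    have huntouched : ∀ it ∈ r.items, it.1 = w0 → pvUpd g ps it = it :=
      fun it _ hit => pvUpd_of_not_mem g (hit ▸ hw0)
    have hg? : (PySem.Dict.mk (r.items.map (pvUpd g ps))).get? w0 = r.get? w0 :=
      pv_get?_mk_map r (pvUpd g ps) (pvUpd_fst g ps) w0 huntouched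
    have hck : (PySem.Dict.mk (r.items.map (pvUpd g ps))).contains w0 = true := by
      rw [PySem.Dict.contains_iff_mem_keys, pv_keys_mk_map r (pvUpd g ps) (pvUpd_fst g ps),
        ← PySem.Dict.contains_iff_mem_keys]
      exact hcont w0 (List.mem_append.mpr (Or.inr (by simp)))
    rw [if_pos hck, PySem.Dict.items_insert_of_contains _ _ hck]
    show (r.items.map (pvUpd g ps)).map _ = _
    rw [List.map_map]
    apply List.map_congr_left
    intro it hit
    show (if ((pvUpd g ps it).1 == w0) = true
        then (w0, PySem.Set.union ((PySem.Dict.mk (r.items.map (pvUpd g ps))).getD w0 PySem.Set.empty) (g w0))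
        else pvUpd g ps it) = pvUpd g (ps ++ [w0]) it
    rw [pvUpd_fst]
    by_cases h0 : it.1 = w0
    · have hrit : r.getD w0 PySem.Set.empty = it.2 := by
        have hmem : r.get? it.1 = some it.2 :=
          PySem.Dict.get?_of_mem_items r (by cases it; exact hit) hnd
        rw [← h0, PySem.Dict.getD_eq_get?_getD, hmem]; rfl
      have hRread : (PySem.Dict.mk (r.items.map (pvUpd g ps))).getD w0 PySem.Set.empty = it.2 := by
        rw [PySem.Dict.getD_eq_get?_getD, hg?, ← PySem.Dict.getD_eq_get?_getD, hrit]
      rw [if_pos (by simp [h0]), hRread,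
        pvUpd_of_mem g (L := ps ++ [w0]) (List.mem_append.mpr (Or.inr (by simp [h0]))), h0]
    · rw [if_neg (by simp [h0])]
      by_cases hmem : it.1 ∈ ps
      · rw [pvUpd_of_mem g hmem, pvUpd_of_mem g (List.mem_append.mpr (Or.inl hmem))]
      · rw [pvUpd_of_not_mem g hmem, pvUpd_of_not_mem g (fun hm => by
          rcases List.mem_append.mp hm with hm | hm
          · exact hmem hm
          · exact h0 (by simpa using hm))]
def pvUpdB (C : PySem.Dict String (PySem.Set String)) (Q : String → Bool) (ks : List String)
    (it : String × PySem.Set String) : String × PySem.Set String :=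
  if it.1 ∈ ks ∧ Q it.1 = true then (it.1, PySem.Set.union it.2 (C.getD it.1 PySem.Set.empty)) else it

lemma pvUpdB_fst (C : PySem.Dict String (PySem.Set String)) (Q : String → Bool) (ks : List String)
    (it : String × PySem.Set String) : (pvUpdB C Q ks it).1 = it.1 := by
  unfold pvUpdB; split <;> rfl

lemma pv_foldC_items (C : PySem.Dict String (PySem.Set String)) (Q : String → Bool)
    (r : PySem.Dict String (PySem.Set String)) (hnd : r.keys.Nodup) :
    ∀ (ps : List (String × PySem.Set String)), (ps.map Prod.fst).Nodup →
      (∀ p ∈ ps, C.get? p.1 = some p.2) →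
      (ps.foldl (fun r' p => if r'.contains p.1 && Q p.1 then
          r'.insert p.1 (PySem.Set.union (r'.getD p.1 PySem.Set.empty) p.2)
        else r') r).items
      = r.items.map (pvUpdB C Q (ps.map Prod.fst)) := by
  intro ps
  induction ps using List.reverseRecOn with
  | nil =>
    intro _ _
    rw [List.foldl_nil,
      List.map_congr_left (fun it _ => by unfold pvUpdB; rw [if_neg (by simp)])]
    exact (List.map_id' r.items).symm
  | append_singleton t p ih =>
    intro hnd' hv
    obtain ⟨hts, hp1⟩ := pv_snoc_fst_nodup hnd'
    have ihs := ih hts (fun q hq => hv q (List.mem_append.mpr (Or.inl hq)))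
    rw [List.foldl_append]
    simp only [List.foldl_cons, List.foldl_nil]
    have hReq : (t.foldl (fun r' p => if r'.contains p.1 && Q p.1 then
          r'.insert p.1 (PySem.Set.union (r'.getD p.1 PySem.Set.empty) p.2)
        else r') r) = PySem.Dict.mk (r.items.map (pvUpdB C Q (t.map Prod.fst))) :=
      PySem.Dict.ext ihs
    rw [hReq]
    have huntouched : ∀ it ∈ r.items, it.1 = p.1 → pvUpdB C Q (t.map Prod.fst) it = it := by
      intro it _ hit
      unfold pvUpdB
      rw [if_neg (fun hc => hp1 (hit ▸ hc.1))]
    have hg? : (PySem.Dict.mk (r.items.map (pvUpdB C Q (t.map Prod.fst)))).get? p.1 = r.get? p.1 :=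
      pv_get?_mk_map r _ (pvUpdB_fst C Q _) p.1 huntouched
    have hcR : (PySem.Dict.mk (r.items.map (pvUpdB C Q (t.map Prod.fst)))).contains p.1 = r.contains p.1 := by
      by_cases h : r.contains p.1 = true
      · rw [h, PySem.Dict.contains_iff_mem_keys, pv_keys_mk_map r _ (pvUpdB_fst C Q _),
          ← PySem.Dict.contains_iff_mem_keys]
        exact h
      · rw [Bool.not_eq_true] at h
        rw [h]
        rw [Bool.eq_false_iff]
        intro hcc
        rw [PySem.Dict.contains_iff_mem_keys, pv_keys_mk_map r _ (pvUpdB_fst C Q _),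
          ← PySem.Dict.contains_iff_mem_keys] at hcc
        rw [h] at hcc
        cases hcc
    have hfsts : (t ++ [p]).map Prod.fst = t.map Prod.fst ++ [p.1] := by simp
    by_cases hgd : ((PySem.Dict.mk (r.items.map (pvUpdB C Q (t.map Prod.fst)))).contains p.1 && Q p.1) = true
    · rcases Bool.and_eq_true_iff.mp hgd with ⟨hcc, hQ⟩
      rw [if_pos hgd, PySem.Dict.items_insert_of_contains _ _ hcc]
      show (r.items.map (pvUpdB C Q (t.map Prod.fst))).map _ = _
      rw [List.map_map]
      apply List.map_congr_left
      intro it hit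
      show (if ((pvUpdB C Q (t.map Prod.fst) it).1 == p.1) = true
          then (p.1, PySem.Set.union ((PySem.Dict.mk (r.items.map (pvUpdB C Q (t.map Prod.fst)))).getD p.1 PySem.Set.empty) p.2)
          else pvUpdB C Q (t.map Prod.fst) it) = pvUpdB C Q ((t ++ [p]).map Prod.fst) it
      rw [pvUpdB_fst]
      by_cases h0 : it.1 = p.1
      · have hrit : r.getD p.1 PySem.Set.empty = it.2 := by
          have hmem : r.get? it.1 = some it.2 :=
            PySem.Dict.get?_of_mem_items r (by cases it; exact hit) hnd
          rw [← h0, PySem.Dict.getD_eq_get?_getD, hmem]; rfl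
        have hRread : (PySem.Dict.mk (r.items.map (pvUpdB C Q (t.map Prod.fst)))).getD p.1 PySem.Set.empty = it.2 := by
          rw [PySem.Dict.getD_eq_get?_getD, hg?, ← PySem.Dict.getD_eq_get?_getD, hrit]
        have hp2 : p.2 = C.getD p.1 PySem.Set.empty := by
          rw [PySem.Dict.getD_eq_get?_getD, hv p (List.mem_append.mpr (Or.inr (by simp)))]; rfl
        rw [if_pos (by simp [h0]), hRread, hp2]
        unfold pvUpdB
        rw [if_pos ⟨by rw [hfsts]; exact List.mem_append.mpr (Or.inr (by simp [h0])), h0 ▸ hQ⟩, h0]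
      · rw [if_neg (by simp [h0])]
        unfold pvUpdB
        have hiff : (it.1 ∈ (t ++ [p]).map Prod.fst) ↔ (it.1 ∈ t.map Prod.fst) := by
          rw [hfsts, List.mem_append]
          constructor
          · intro h; rcases h with h | h
            · exact h
            · exact absurd (by simpa using h) h0
          · exact Or.inl
        by_cases hc : it.1 ∈ t.map Prod.fst ∧ Q it.1 = true
        · rw [if_pos hc, if_pos ⟨hiff.mpr hc.1, hc.2⟩]
        · rw [if_neg hc, if_neg (fun hcc => hc ⟨hiff.mp hcc.1, hcc.2⟩)]
    · rw [if_neg hgd]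
      show List.map (pvUpdB C Q (t.map Prod.fst)) r.items = _
      apply List.map_congr_left
      intro it hit
      unfold pvUpdB
      by_cases h0 : it.1 = p.1
      · have hcr : r.contains p.1 = true := by
          rw [PySem.Dict.contains_iff_mem_keys]
          exact h0 ▸ List.mem_map_of_mem hit
        have hQf : Q p.1 = false := by
          rcases Bool.and_eq_false_iff.mp (Bool.eq_false_iff.mpr hgd) with h | h
          · rw [hcR] at h; rw [hcr] at h; cases h
          · exact h
        rw [if_neg (fun hc => by rw [h0, hQf] at hc; cases hc.2),
          if_neg (fun hc => by rw [h0, hQf] at hc; cases hc.2)]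
      · have hiff : (it.1 ∈ (t ++ [p]).map Prod.fst) ↔ (it.1 ∈ t.map Prod.fst) := by
          rw [hfsts, List.mem_append]
          constructor
          · intro h; rcases h with h | h
            · exact h
            · exact absurd (by simpa using h) h0
          · exact Or.inl
        by_cases hc : it.1 ∈ t.map Prod.fst ∧ Q it.1 = true
        · rw [if_pos hc, if_pos ⟨hiff.mpr hc.1, hc.2⟩]
        · rw [if_neg hc, if_neg (fun hcc => hc ⟨hiff.mp hcc.1, hcc.2⟩)]
-- ## fresh-key folds from the empty dict, and the post-fill loop

lemma pv_contains_mk_keyfun {L : List String} {g : String → PySem.Set String} {w0 : String}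
    (h : w0 ∉ L) :
    (PySem.Dict.mk (L.map (fun w => (w, g w)))).contains w0 = false := by
  show (L.map (fun w => (w, g w))).any (fun p => p.1 == w0) = false
  rw [List.any_map, List.any_eq_false]
  intro x hx hbe
  have hxw : x = w0 := by simpa using hbe
  exact h (hxw ▸ hx)

lemma pv_foldK_empty_items (g : String → PySem.Set String) :
    ∀ (L : List String), L.Nodup →
      (L.foldl (fun r' w => if r'.contains w then
          r'.insert w (PySem.Set.union (r'.getD w PySem.Set.empty) (g w))
        else r'.insert w (g w)) PySem.Dict.empty).items
      = L.map (fun w => (w, g w)) := by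
  intro L
  induction L using List.reverseRecOn with
  | nil => intro _; rfl
  | append_singleton ps w0 ih =>
    intro hL
    have hps : ps.Nodup := (List.nodup_append.mp hL).1
    have hw0 : w0 ∉ ps := by
      have h := (List.nodup_append.mp hL).2.2
      exact fun hm => h w0 hm w0 (by simp) rfl
    have ihs := ih hps
    rw [List.foldl_append]
    simp only [List.foldl_cons, List.foldl_nil]
    have hReq : (ps.foldl (fun r' w => if r'.contains w then
          r'.insert w (PySem.Set.union (r'.getD w PySem.Set.empty) (g w))
        else r'.insert w (g w)) PySem.Dict.empty)
        = PySem.Dict.mk (ps.map (fun w => (w, g w))) := PySem.Dict.ext ihs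
    rw [hReq]
    have hcf := pv_contains_mk_keyfun (g := g) hw0
    rw [if_neg (by rw [hcf]; exact Bool.false_ne_true),
      PySem.Dict.items_insert_of_not_contains _ _ hcf]
    show ps.map (fun w => (w, g w)) ++ [(w0, g w0)] = _
    rw [List.map_append]
    rfl

lemma pv_r0_items :
    ∀ (L : List String), L.Nodup →
      (L.foldl (fun (r : PySem.Dict String (PySem.Set String)) w => r.insert w PySem.Set.empty) PySem.Dict.empty).items
      = L.map (fun w => (w, (PySem.Set.empty : PySem.Set String))) := by
  intro L
  induction L using List.reverseRecOn with
  | nil => intro _; rfl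
  | append_singleton ps w0 ih =>
    intro hL
    have hps : ps.Nodup := (List.nodup_append.mp hL).1
    have hw0 : w0 ∉ ps := by
      have h := (List.nodup_append.mp hL).2.2
      exact fun hm => h w0 hm w0 (by simp) rfl
    rw [List.foldl_append]
    simp only [List.foldl_cons, List.foldl_nil]
    have hReq : (ps.foldl (fun (r : PySem.Dict String (PySem.Set String)) w => r.insert w PySem.Set.empty) PySem.Dict.empty)
        = PySem.Dict.mk (ps.map (fun w => (w, (PySem.Set.empty : PySem.Set String)))) := PySem.Dict.ext (ih hps)
    rw [hReq]
    have hcf := pv_contains_mk_keyfun (g := fun _ => (PySem.Set.empty : PySem.Set String)) hw0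
    rw [PySem.Dict.items_insert_of_not_contains _ _ hcf]
    show ps.map (fun w => (w, (PySem.Set.empty : PySem.Set String))) ++ [(w0, PySem.Set.empty)] = _
    rw [List.map_append]
    rfl

lemma pv_postfill_empty_items :
    ∀ (L : List String), L.Nodup →
      (L.foldl (fun (r : PySem.Dict String (PySem.Set String)) w => if ¬ r.contains w then r.insert w PySem.Set.empty else r) PySem.Dict.empty).items
      = L.map (fun w => (w, (PySem.Set.empty : PySem.Set String))) := by
  intro L
  induction L using List.reverseRecOn with
  | nil => intro _; rfl
  | append_singleton ps w0 ih =>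
    intro hL
    have hps : ps.Nodup := (List.nodup_append.mp hL).1
    have hw0 : w0 ∉ ps := by
      have h := (List.nodup_append.mp hL).2.2
      exact fun hm => h w0 hm w0 (by simp) rfl
    rw [List.foldl_append]
    simp only [List.foldl_cons, List.foldl_nil]
    have hReq : (ps.foldl (fun (r : PySem.Dict String (PySem.Set String)) w => if ¬ r.contains w then r.insert w PySem.Set.empty else r) PySem.Dict.empty)
        = PySem.Dict.mk (ps.map (fun w => (w, (PySem.Set.empty : PySem.Set String)))) := PySem.Dict.ext (ih hps)
    rw [hReq]
    have hcf := pv_contains_mk_keyfun (g := fun _ => (PySem.Set.empty : PySem.Set String)) hw0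
    rw [if_pos (by rw [hcf]; exact Bool.false_ne_true),
      PySem.Dict.items_insert_of_not_contains _ _ hcf]
    show ps.map (fun w => (w, (PySem.Set.empty : PySem.Set String))) ++ [(w0, PySem.Set.empty)] = _
    rw [List.map_append]
    rfl

lemma pv_postfill_id :
    ∀ (L : List String) (r : PySem.Dict String (PySem.Set String)),
      (∀ w ∈ L, r.contains w = true) →
      L.foldl (fun (r : PySem.Dict String (PySem.Set String)) w => if ¬ r.contains w then r.insert w PySem.Set.empty else r) r = r := by
  intro L
  induction L with
  | nil => intro r _; rfl
  | cons x t ih =>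
    intro r hc
    simp only [List.foldl_cons]
    rw [if_neg (by rw [hc x (by simp)]; simp)]
    exact ih r (fun w hw => hc w (by simp [hw]))
-- ## the two per-constraint steps coincide

lemma pv_norm_keys_nodup (xs : List (String × List String)) : (pvNorm xs).keys.Nodup :=
  PySem.Dict.nodup_keys_ofList _

lemma pv_norm_items_fst_nodup (xs : List (String × List String)) :
    ((pvNorm xs).items.map Prod.fst).Nodup := pv_norm_keys_nodup xs

lemma pv_norm_item_val_nodup (xs : List (String × List String)) :
    ∀ p ∈ (pvNorm xs).items, (p.2 : List String).Nodup := by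
  intro p hp
  exact pv_norm_get?_nodup xs p.1 p.2
    (PySem.Dict.get?_of_mem_items _ (by cases p; exact hp) (pv_norm_keys_nodup xs))

lemma pv_upd_congr {g g' : String → PySem.Set String} {L : List String}
    (h : ∀ w ∈ L, g w = g' w) (it : String × PySem.Set String) :
    pvUpd g L it = pvUpd g' L it := by
  unfold pvUpd
  by_cases hm : it.1 ∈ L
  · rw [if_pos hm, if_pos hm, h it.1 hm]
  · rw [if_neg hm, if_neg hm]

lemma pv_gA_eq_gB' (form selection c : List (String × List String)) (w : String) :
    pvAgg ((pvNorm selection).items.foldl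
        (pvSelStep (pvNorm c) (pvNorm form).keys) PySem.Dict.empty) w
        (pvNorm selection).keys PySem.Set.empty
      = pvGB (pvNorm selection) (pvNorm c) w := by
  refine pv_gA_eq_gB (pvNorm selection) (pvNorm c) _ ?_ ?_ w
  · exact pv_pcr_key_none (pvNorm selection) (pvNorm c) (pvNorm form).keys
      (pv_norm_keys_nodup selection) (pv_norm_items_fst_nodup c) (pv_norm_item_val_nodup c)
  · exact (pv_pcr_char (pvNorm c) (pvNorm form).keys (pv_norm_items_fst_nodup c)
      (pv_norm_item_val_nodup c) (pvNorm selection).items (pv_norm_items_fst_nodup selection)).2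

lemma pv_stepA_items (form selection c : List (String × List String))
    (r : PySem.Dict String (PySem.Set String)) (hk : r.keys = (pvNorm form).keys) :
    (pvStepA (pvNorm form) (pvNorm selection) r c).items
    = r.items.map (pvUpd (pvGB (pvNorm selection) (pvNorm c)) (pvNorm form).keys) := by
  have hnd : r.keys.Nodup := hk ▸ pv_norm_keys_nodup form
  have hcont : ∀ w ∈ (pvNorm form).keys, r.contains w = true :=
    fun w hw => (PySem.Dict.contains_iff_mem_keys r w).mpr (hk ▸ hw)
  have hfold := pv_foldK_items
    (fun w => pvAgg ((pvNorm selection).items.foldl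
        (pvSelStep (pvNorm c) (pvNorm form).keys) PySem.Dict.empty) w
        (pvNorm selection).keys PySem.Set.empty)
    r hnd (pvNorm form).keys (pv_norm_keys_nodup form) hcont
  refine Eq.trans (b := r.items.map (pvUpd (fun w => pvAgg ((pvNorm selection).items.foldl
        (pvSelStep (pvNorm c) (pvNorm form).keys) PySem.Dict.empty) w
        (pvNorm selection).keys PySem.Set.empty) (pvNorm form).keys)) hfold ?_
  exact List.map_congr_left (fun it _ =>
    pv_upd_congr (fun w _ => pv_gA_eq_gB' form selection c w) it)

lemma pv_stepB_items (selection c : List (String × List String))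
    (r : PySem.Dict String (PySem.Set String)) (hnd : r.keys.Nodup) :
    (pvStepB (pvNorm selection) r c).items
    = r.items.map (pvUpdB (pvNorm c) (pvCondB (pvNorm selection) (pvNorm c))
        ((pvNorm c).items.map Prod.fst)) := by
  exact pv_foldC_items (pvNorm c) (pvCondB (pvNorm selection) (pvNorm c)) r hnd
    (pvNorm c).items (pv_norm_items_fst_nodup c)
    (fun p hp => PySem.Dict.get?_of_mem_items _ (by cases p; exact hp) (pv_norm_keys_nodup c))

lemma pv_mem_fst_iff_contains {d : PySem.Dict String (PySem.Set String)} {k : String} :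
    k ∈ d.items.map Prod.fst ↔ d.contains k = true := (PySem.Dict.contains_iff_mem_keys d k).symm

lemma pv_point_eq (selection c : List (String × List String)) (it : String × PySem.Set String) :
    (it.1, PySem.Set.union it.2 (pvGB (pvNorm selection) (pvNorm c) it.1))
    = pvUpdB (pvNorm c) (pvCondB (pvNorm selection) (pvNorm c)) ((pvNorm c).items.map Prod.fst) it := by
  unfold pvGB pvUpdB
  by_cases hc : (pvNorm c).contains it.1 = true
  · by_cases hq : pvCondB (pvNorm selection) (pvNorm c) it.1 = true
    · rw [if_pos (by rw [hc, hq]; rfl), if_pos ⟨pv_mem_fst_iff_contains.mpr hc, hq⟩]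
    · rw [if_neg (fun h => hq (Bool.and_eq_true_iff.mp h).2), if_neg (fun h => hq h.2)]
      show (it.1, PySem.Set.union it.2 []) = it
      rw [pv_union_nil_right]
  · rw [if_neg (fun h => hc (Bool.and_eq_true_iff.mp h).1),
      if_neg (fun h => hc (pv_mem_fst_iff_contains.mp h.1))]
    show (it.1, PySem.Set.union it.2 []) = it
    rw [pv_union_nil_right]

lemma pv_step_eq (form selection c : List (String × List String))
    (r : PySem.Dict String (PySem.Set String)) (hk : r.keys = (pvNorm form).keys) :
    pvStepA (pvNorm form) (pvNorm selection) r c = pvStepB (pvNorm selection) r c := by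
  apply PySem.Dict.ext
  rw [pv_stepA_items form selection c r hk,
    pv_stepB_items selection c r (hk ▸ pv_norm_keys_nodup form)]
  apply List.map_congr_left
  intro it hit
  have hmemK : it.1 ∈ (pvNorm form).keys := hk ▸ List.mem_map_of_mem hit
  rw [pvUpd_of_mem _ hmemK]
  exact pv_point_eq selection c it

lemma pv_stepB_keys (selection c : List (String × List String))
    (r : PySem.Dict String (PySem.Set String)) (hnd : r.keys.Nodup) :
    (pvStepB (pvNorm selection) r c).keys = r.keys := by
  rw [pv_keys_items_fst, pv_stepB_items selection c r hnd, List.map_map]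
  exact List.map_congr_left (fun it _ => pvUpdB_fst _ _ _ it)

lemma pv_fold_eq (form selection : List (String × List String)) :
    ∀ (cs : List (List (String × List String))) (r : PySem.Dict String (PySem.Set String)),
      r.keys = (pvNorm form).keys →
      cs.foldl (pvStepA (pvNorm form) (pvNorm selection)) r
      = cs.foldl (pvStepB (pvNorm selection)) r := by
  intro cs
  induction cs with
  | nil => intro r _; rfl
  | cons c cs ih =>
    intro r hk
    simp only [List.foldl_cons]
    rw [pv_step_eq form selection c r hk]
    exact ih _ (by rw [pv_stepB_keys selection c r (hk ▸ pv_norm_keys_nodup form)]; exact hk)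

lemma pv_foldB_keys (form selection : List (String × List String)) :
    ∀ (cs : List (List (String × List String))) (r : PySem.Dict String (PySem.Set String)),
      r.keys = (pvNorm form).keys →
      (cs.foldl (pvStepB (pvNorm selection)) r).keys = (pvNorm form).keys := by
  intro cs
  induction cs with
  | nil => intro r hk; exact hk
  | cons c cs ih =>
    intro r hk
    simp only [List.foldl_cons]
    exact ih _ (by rw [pv_stepB_keys selection c r (hk ▸ pv_norm_keys_nodup form)]; exact hk)

lemma pv_r0_keys (form : List (String × List String)) :
    ((pvNorm form).keys.foldl (fun (r : PySem.Dict String (PySem.Set String)) w =>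
        r.insert w PySem.Set.empty) PySem.Dict.empty).keys = (pvNorm form).keys := by
  rw [pv_keys_items_fst, pv_r0_items (pvNorm form).keys (pv_norm_keys_nodup form), List.map_map]
  exact List.map_id' _

lemma pv_first_step (form selection c : List (String × List String)) :
    pvStepA (pvNorm form) (pvNorm selection) PySem.Dict.empty c
    = pvStepB (pvNorm selection)
        ((pvNorm form).keys.foldl (fun (r : PySem.Dict String (PySem.Set String)) w =>
          r.insert w PySem.Set.empty) PySem.Dict.empty) c := by
  apply PySem.Dict.ext
  have hA : (pvStepA (pvNorm form) (pvNorm selection) PySem.Dict.empty c).items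
      = (pvNorm form).keys.map (fun w => (w, pvAgg ((pvNorm selection).items.foldl
          (pvSelStep (pvNorm c) (pvNorm form).keys) PySem.Dict.empty) w
          (pvNorm selection).keys PySem.Set.empty)) :=
    pv_foldK_empty_items _ (pvNorm form).keys (pv_norm_keys_nodup form)
  rw [hA, pv_stepB_items selection c _ (by rw [pv_r0_keys form]; exact pv_norm_keys_nodup form),
    pv_r0_items (pvNorm form).keys (pv_norm_keys_nodup form), List.map_map]
  apply List.map_congr_left
  intro w _
  rw [pv_gA_eq_gB' form selection c w]
  have hpt := pv_point_eq selection c (w, (PySem.Set.empty : PySem.Set String))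
  rw [show PySem.Set.union (PySem.Set.empty : PySem.Set String)
        (pvGB (pvNorm selection) (pvNorm c) w)
      = pvGB (pvNorm selection) (pvNorm c) w from ?_] at hpt
  · exact hpt
  · rw [pv_set_empty, pv_union_nil_left]
    unfold pvGB
    split
    · exact PySem.Set.ofList_eq_self_of_nodup _ (pv_norm_getD_nodup c w)
    · rfl

lemma pv_result_eq (form selection : List (String × List String))
    (constraints : List (List (String × List String))) :
    (pvNorm form).keys.foldl (fun (r : PySem.Dict String (PySem.Set String)) w =>
        if ¬ r.contains w then r.insert w PySem.Set.empty else r)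
      (constraints.foldl (pvStepA (pvNorm form) (pvNorm selection)) PySem.Dict.empty)
    = constraints.foldl (pvStepB (pvNorm selection))
        ((pvNorm form).keys.foldl (fun (r : PySem.Dict String (PySem.Set String)) w =>
          r.insert w PySem.Set.empty) PySem.Dict.empty) := by
  cases constraints with
  | nil =>
    simp only [List.foldl_nil]
    apply PySem.Dict.ext
    rw [pv_postfill_empty_items (pvNorm form).keys (pv_norm_keys_nodup form),
      pv_r0_items (pvNorm form).keys (pv_norm_keys_nodup form)]
  | cons c cs =>
    simp only [List.foldl_cons]
    rw [pv_first_step form selection c,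
      pv_fold_eq form selection cs _ (by
        rw [pv_stepB_keys selection c _ (by rw [pv_r0_keys form]; exact pv_norm_keys_nodup form)]
        exact pv_r0_keys form)]
    refine pv_postfill_id (pvNorm form).keys _ (fun w hw => ?_)
    rw [PySem.Dict.contains_iff_mem_keys,
      pv_foldB_keys form selection cs _ (by
        rw [pv_stepB_keys selection c _ (by rw [pv_r0_keys form]; exact pv_norm_keys_nodup form)]
        exact pv_r0_keys form)]
    exact hw

lemma pv_main (form selection : List (String × List String))
    (constraints : List (List (String × List String))) :
    apply_constraints_in_old_cds_fashion3 form selection constraints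
    = apply_constraints_in_old_cds_fashion3_alt form selection constraints := by
  simp only [apply_constraints_in_old_cds_fashion3, apply_constraints_in_old_cds_fashion3_alt]
  by_cases hs : (pvNorm selection).size = 0
  · rw [if_pos hs, if_pos hs]
  · rw [if_neg hs, if_neg hs, pv_result_eq form selection constraints]

-- ===== VERDICT (by name: the statement is the Claim_ definition above) =====
theorem apply_constraints_in_old_cds_fashion3_spec : Claim_equal_apply_constraints_in_old_cds_fashion3 := by
  intro form selection constraints _ _
  exact pv_main form selection constraints
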